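-- pv_equiv track=rewrite | github.com/hvanwyk/drifters | buoy_dates.py | count_buoys
-- ===== SOURCE A (Python) =====
-- def count_buoys(start_dates, date_ranges):
--     # bins (i.e. each year for which buoy data exists)
--     x_values = sorted(set(start_dates))
--
--     # create dictionary of years in x_values with keys set to 0
--     year_counts = {}
--
--     # set initial counts for each year to zero
--     for item in x_values:
--         year_counts[item] = 0
--
--     # for each buoy in start dates, and for each year this buoy was alive,
--     # add to a counter for each year
--     n = 0
--     for element in start_dates:
--         for k in range(date_ranges[n]):
--             # add one to each year's key
--             if element + k in year_counts:
--                 year_counts[element + k] += 1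
--         n += 1
--     return x_values, year_counts
-- ===== SOURCE B (Python) =====
-- def count_buoys(start_dates, date_ranges):
--     # year-major: for each distinct start year, count buoys whose life span
--     # [s, s+r) covers it -- no dict mutation, no walk over each buoy's range
--     x_values = sorted(set(start_dates))
--     pairs = list(zip(start_dates, date_ranges))
--     year_counts = {x: sum(1 for s, r in pairs if s <= x < s + r) for x in x_values}
--     return x_values, year_counts
-- ===== Notes on version B (the rewrite author's own statement) =====
-- stated objective: alternative
-- what changed: A walks every year k in range(date_ranges[n]) for every buoy, mutating a dict of counters; B never enumerates a buoy's range: for each distinct start year it directly counts the buoys whose interval [s, s+r) contains that year, building the result dict in one comprehension (O(B*X) comparisons instead of O(sum of ranges) dict updates).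
import Mathlib
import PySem

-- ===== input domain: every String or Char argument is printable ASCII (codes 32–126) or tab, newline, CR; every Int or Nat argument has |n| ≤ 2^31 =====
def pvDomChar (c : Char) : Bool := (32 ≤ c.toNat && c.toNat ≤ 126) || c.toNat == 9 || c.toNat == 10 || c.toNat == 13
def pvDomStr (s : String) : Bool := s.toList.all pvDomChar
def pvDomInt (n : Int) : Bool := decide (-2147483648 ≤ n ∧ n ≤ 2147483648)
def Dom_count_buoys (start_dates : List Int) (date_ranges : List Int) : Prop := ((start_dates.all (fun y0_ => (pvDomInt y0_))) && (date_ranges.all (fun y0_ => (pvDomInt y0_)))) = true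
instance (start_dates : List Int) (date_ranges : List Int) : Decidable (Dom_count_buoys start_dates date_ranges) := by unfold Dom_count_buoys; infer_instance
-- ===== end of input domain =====

-- B replaces A's dict mutation over every year of every buoy's range by a year-major
-- direct interval count per distinct start year (objective: alternative algorithm).

-- ===== PORT A =====
def count_buoys (start_dates : List Int) (date_ranges : List Int) : List Int × (List (Int × Int)) :=
  let x_values : List Int := PySem.List.sorted (PySem.Set.ofList start_dates) (fun x => x) false
  -- year_counts = {}; for item in x_values: year_counts[item] = 0
  let year_counts : PySem.Dict Int Int :=
    x_values.foldl (fun d item => d.insert item 0) PySem.Dict.empty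
  -- n = 0; for element in start_dates: for k in range(date_ranges[n]): …; n += 1
  -- (date_ranges[n] raises IndexError when n ≥ len(date_ranges): excluded by Pre_)
  let st := start_dates.foldl
    (fun (st : PySem.Dict Int Int × Int) element =>
      ((PySem.List.pyRange 0 (PySem.List.pyGetD date_ranges st.2 0)).foldl
          (fun d k => if d.contains (element + k) then d.modify (element + k) 0 (· + 1) else d)
          st.1,
       st.2 + 1))
    (year_counts, (0 : Int))
  (x_values, st.1.items)

-- ===== PORT B =====
def count_buoys_alt (start_dates : List Int) (date_ranges : List Int) : List Int × (List (Int × Int)) :=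
  let x_values : List Int := PySem.List.sorted (PySem.Set.ofList start_dates) (fun x => x) false
  let pairs := start_dates.zip date_ranges
  let year_counts :=
    x_values.map (fun x => (x, (pairs.countP (fun p => decide (p.1 ≤ x ∧ x < p.1 + p.2)) : Int)))
  (x_values, year_counts)

-- ===== PRECONDITION & SPEC =====
-- Pre_ excludes exactly the inputs where A raises IndexError: date_ranges shorter than start_dates.
def Pre_count_buoys (start_dates : List Int) (date_ranges : List Int) : Prop :=
  start_dates.length ≤ date_ranges.length
instance (start_dates : List Int) (date_ranges : List Int) : Decidable (Pre_count_buoys start_dates date_ranges) := by unfold Pre_count_buoys; infer_instance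
def pvWitness_count_buoys : List Int × List Int := ([2000, 1999, 2000], [3, 1, 2])

def Spec_count_buoys (start_dates : List Int) (date_ranges : List Int) (out : List Int × (List (Int × Int))) : Prop := out = count_buoys_alt start_dates date_ranges
instance (start_dates : List Int) (date_ranges : List Int) (out : List Int × (List (Int × Int))) : Decidable (Spec_count_buoys start_dates date_ranges out) := by unfold Spec_count_buoys; infer_instance

-- ===== CLAIM (what is proved, stated in full; the proofs are below) =====
def Claim_equal_count_buoys : Prop := ∀ (start_dates : List Int) (date_ranges : List Int), Dom_count_buoys start_dates date_ranges → Pre_count_buoys start_dates date_ranges → Spec_count_buoys start_dates date_ranges (count_buoys start_dates date_ranges)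

-- ===== LEMMAS AND PROOFS =====

-- Python's range(0, r) as a mapped Nat range (empty for r ≤ 0).
lemma pyRange_zero_eq_map (r : Int) :
    PySem.List.pyRange 0 r = List.map (fun k : Nat => (k : Int)) (List.range r.toNat) := by
  by_cases h : r ≤ 0
  · simp [PySem.List.pyRange_one_eq_nil h, Int.toNat_of_nonpos h]
  · have h2 := PySem.List.pyRange_zero_natCast r.toNat
    rw [Int.toNat_of_nonneg (by omega : (0:Int) ≤ r)] at h2
    rw [h2]

lemma count_pyRange_zero (r v : Int) :
    (PySem.List.pyRange 0 r).count v = if 0 ≤ v ∧ v < r then 1 else 0 := by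
  have hnd : (PySem.List.pyRange 0 r).Nodup := by
    rw [pyRange_zero_eq_map]
    exact List.Nodup.map (fun a b h => by exact_mod_cast h) List.nodup_range
  by_cases hv : 0 ≤ v ∧ v < r
  · simp [List.Nodup.count hnd, PySem.List.mem_pyRange_one, hv]
  · simp [List.Nodup.count hnd, PySem.List.mem_pyRange_one, hv]

-- Inner loop of A: keys unchanged, and each present key x gains one
-- for every k in ks with e + k = x.
lemma inner_loop (e : Int) (ks : List Int) (d : PySem.Dict Int Int) :
    (ks.foldl (fun d k => if d.contains (e + k) then d.modify (e + k) 0 (· + 1) else d) d).keys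
        = d.keys ∧
    ∀ x : Int,
      (ks.foldl (fun d k => if d.contains (e + k) then d.modify (e + k) 0 (· + 1) else d) d).getD x 0
        = d.getD x 0 + (if d.contains x then (ks.count (x - e) : Int) else 0) := by
  induction ks generalizing d with
  | nil => simp
  | cons k t ih =>
    set d' := (if d.contains (e + k) then d.modify (e + k) 0 (· + 1) else d) with hd'
    have hkeys1 : d'.keys = d.keys := by
      rw [hd']
      split
      · rw [PySem.Dict.keys_modify, PySem.Dict.keys_insert_of_contains]
        assumption
      · rfl
    have hcont1 : ∀ y, d'.contains y = d.contains y := by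
      intro y
      rw [PySem.Dict.contains_eq_decide_mem_keys d' y, PySem.Dict.contains_eq_decide_mem_keys d y,
        hkeys1]
    obtain ⟨ihk, ihv⟩ := ih d' 
    constructor
    · simpa [hkeys1] using ihk
    · intro x
      rw [List.foldl_cons, ihv x, hcont1 x]
      have hgd : d'.getD x 0 = d.getD x 0 + (if d.contains x ∧ x = e + k then 1 else 0) := by
        rw [hd']
        by_cases hx : x = e + k
        · subst hx
          by_cases hc : d.contains (e + k)
          · simp [hc]
          · simp [hc]
        · by_cases hc : d.contains (e + k)
          · simp [hc, PySem.Dict.getD_modify, hx]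
          · simp [hc, hx]
      rw [hgd]
      have hcnt : (k :: t).count (x - e) = t.count (x - e) + (if x = e + k then 1 else 0) := by
        rw [List.count_cons]
        by_cases hx : x = e + k
        · simp [hx, show e + k - e = k by ring]
        · have : ¬ (k = x - e) := by omega
          simp [hx, this]
      by_cases hc : d.contains x
      · simp only [hc, if_true, hcnt, true_and]
        split_ifs with hx <;> push_cast <;> ring
      · simp [hc]

-- Outer loop of A, with the running index n materialised as a Nat.
lemma outer_loop (dr : List Int) (x : Int) :
    ∀ (sd : List Int) (d : PySem.Dict Int Int) (n : Nat),
    n + sd.length ≤ dr.length →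
    ((sd.foldl
        (fun (st : PySem.Dict Int Int × Int) element =>
          ((PySem.List.pyRange 0 (PySem.List.pyGetD dr st.2 0)).foldl
              (fun d k => if d.contains (element + k) then d.modify (element + k) 0 (· + 1) else d)
              st.1,
           st.2 + 1))
        (d, (n : Int))).1.keys = d.keys ∧
     (sd.foldl
        (fun (st : PySem.Dict Int Int × Int) element =>
          ((PySem.List.pyRange 0 (PySem.List.pyGetD dr st.2 0)).foldl
              (fun d k => if d.contains (element + k) then d.modify (element + k) 0 (· + 1) else d)
              st.1,
           st.2 + 1))
        (d, (n : Int))).1.getD x 0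
       = d.getD x 0 + (if d.contains x then
           ((sd.zip (dr.drop n)).countP (fun p => decide (p.1 ≤ x ∧ x < p.1 + p.2)) : Int) else 0)) := by
  intro sd
  induction sd with
  | nil => intro d n _; simp
  | cons s t ih =>
    intro d n hlen
    have hn : n < dr.length := by simp at hlen; omega
    have hdrop : dr.drop n = dr[n] :: dr.drop (n + 1) := (List.getElem_cons_drop hn).symm
    have hget : PySem.List.pyGetD dr (n : Int) 0 = dr[n] := by
      rw [PySem.List.pyGetD_natCast]
      exact List.getD_eq_getElem dr 0 hn
    obtain ⟨hk1, hv1⟩ := inner_loop s (PySem.List.pyRange 0 dr[n]) d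
    have hcast : ((n : Int) + 1) = ((n + 1 : Nat) : Int) := by push_cast; ring
    obtain ⟨ihk, ihv⟩ := ih
      ((PySem.List.pyRange 0 dr[n]).foldl
        (fun d k => if d.contains (s + k) then d.modify (s + k) 0 (· + 1) else d) d)
      (n + 1) (by simp at hlen ⊢; omega)
    constructor
    · rw [List.foldl_cons, hget, hcast]
      rw [ihk, hk1]
    · rw [List.foldl_cons, hget, hcast, ihv]
      have hcont1 : ∀ y, ((PySem.List.pyRange 0 dr[n]).foldl
          (fun d k => if d.contains (s + k) then d.modify (s + k) 0 (· + 1) else d) d).contains y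
          = d.contains y := by
        intro y
        rw [PySem.Dict.contains_eq_decide_mem_keys, PySem.Dict.contains_eq_decide_mem_keys, hk1]
      rw [hcont1, hv1, hdrop]
      by_cases hc : d.contains x
      · simp only [hc, if_true, count_pyRange_zero, List.zip_cons_cons, List.countP_cons]
        by_cases hin : 0 ≤ x - s ∧ x - s < dr[n]
        · have hd : decide (s ≤ x ∧ x < s + dr[n]) = true := by simp; omega
          simp only [if_pos hin, hd, if_true]
          push_cast
          ring
        · have hd : decide (s ≤ x ∧ x < s + dr[n]) = false := by simp; omega
          simp only [if_neg hin, hd, Bool.false_eq_true, if_false]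
          push_cast
          ring
      · simp [hc]

-- The initialisation loop: every key starts at 0.
lemma init_getD (l : List Int) (d : PySem.Dict Int Int) (x : Int) (h : d.getD x 0 = 0) :
    (l.foldl (fun d y => d.insert y 0) d).getD x 0 = 0 := by
  induction l generalizing d with
  | nil => exact h
  | cons y t ih =>
    rw [List.foldl_cons]
    apply ih
    rw [PySem.Dict.getD_insert]
    split
    · rfl
    · exact h

theorem count_buoys_spec : Claim_equal_count_buoys := by
  intro sd dr _ hpre
  unfold Spec_count_buoys count_buoys count_buoys_alt
  dsimp only
  have hX : (PySem.List.sorted (PySem.Set.ofList sd) (fun x => x) false).Nodup :=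
    (PySem.List.sorted_perm (PySem.Set.ofList sd) (fun x => x) false).nodup_iff.mpr
      (PySem.Set.nodup_ofList sd)
  set X := PySem.List.sorted (PySem.Set.ofList sd) (fun x => x) false with hXdef
  -- the initial dict
  set d0 : PySem.Dict Int Int := X.foldl (fun d item => d.insert item 0) PySem.Dict.empty with hd0
  have hkeys0 : d0.keys = X := by
    rw [hd0]
    have := PySem.Dict.keys_foldl_insert (ν := Int) X (fun _ _ => 0) PySem.Dict.empty
    simpa [PySem.Set.update, ← PySem.Set.ofList_eq_foldl,
      PySem.Set.ofList_eq_self_of_nodup X hX] using this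
  have hget0 : ∀ x : Int, d0.getD x 0 = 0 := fun x => init_getD X PySem.Dict.empty x (by simp)
  refine Prod.ext rfl ?_
  -- items of the final dict
  have hfinkeys : ((sd.foldl
      (fun (st : PySem.Dict Int Int × Int) element =>
        ((PySem.List.pyRange 0 (PySem.List.pyGetD dr st.2 0)).foldl
            (fun d k => if d.contains (element + k) then d.modify (element + k) 0 (· + 1) else d)
            st.1,
         st.2 + 1))
      (d0, (0 : Int))).1).keys = X := by
    have := (outer_loop dr 0 sd d0 0 (by simpa using hpre)).1
    simpa [hkeys0] using this
  rw [PySem.Dict.items_eq_map_keys _ (hfinkeys ▸ hX) 0, hfinkeys]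
  refine List.map_congr_left ?_
  intro x hx
  have hcx : d0.contains x = true := by
    rw [PySem.Dict.contains_eq_decide_mem_keys, hkeys0]
    simpa using hx
  have := (outer_loop dr x sd d0 0 (by simpa using hpre)).2
  simp only [Nat.cast_zero, List.drop_zero] at this
  rw [this, hget0, hcx]
  simp
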